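-- pv_equiv track=rewrite | github.com/brunomartinsmv/era5-daily-statistics-data-download | gerar_bib_revisao_ultimos_5_anos.py | encontrar_virgula_nivel_zero
-- ===== SOURCE A (Python) =====
-- def encontrar_virgula_nivel_zero(texto: str) -> int:
--     nivel = 0
--     for i, ch in enumerate(texto):
--         if ch == "{":
--             nivel += 1
--         elif ch == "}":
--             nivel -= 1
--         elif ch == "," and nivel == 0:
--             return i
--     raise ValueError("Entrada BibTeX invalida: chave nao encontrada.")
-- ===== SOURCE B (Python) =====
-- def encontrar_virgula_nivel_zero(texto: str) -> int:
--     # Pass 1: inclusive running brace balance for each position.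
--     bal = []
--     s = 0
--     for c in texto:
--         if c == "{":
--             s += 1
--         elif c == "}":
--             s -= 1
--         bal.append(s)
--     # Pass 2: first comma whose inclusive balance is zero
--     # (a comma contributes 0, so this equals the nesting level before it).
--     for i, c in enumerate(texto):
--         if c == "," and bal[i] == 0:
--             return i
--     raise ValueError("Entrada BibTeX invalida: chave nao encontrada.")
-- ===== Notes on version B (the rewrite author's own statement) =====
-- stated objective: alternative
-- what changed: Replaces the single stateful scan (one loop tracking nivel and deciding in-loop) by a two-pass decomposition: first build the inclusive running brace-balance table, then a separate search pass returning the first index whose character is ',' and whose table entry is 0.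
import Mathlib
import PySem

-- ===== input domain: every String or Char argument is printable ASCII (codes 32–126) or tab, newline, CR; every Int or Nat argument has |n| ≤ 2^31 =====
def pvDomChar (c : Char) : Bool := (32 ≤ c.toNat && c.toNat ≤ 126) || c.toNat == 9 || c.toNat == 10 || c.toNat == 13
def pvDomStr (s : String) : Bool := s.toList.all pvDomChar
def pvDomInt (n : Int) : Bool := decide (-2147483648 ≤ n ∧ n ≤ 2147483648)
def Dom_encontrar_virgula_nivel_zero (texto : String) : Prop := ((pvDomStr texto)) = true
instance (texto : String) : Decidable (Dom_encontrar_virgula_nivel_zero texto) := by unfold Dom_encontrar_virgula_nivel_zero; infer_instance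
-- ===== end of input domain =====

-- ===== PORT A =====
-- A: one stateful scan tracking nivel; returns the first comma index at level 0.
-- Python raises ValueError when no such comma exists: the loop returns none there
-- and those inputs are excluded by Pre_ (the .getD 0 default is never reached under Pre_).
def pvLoopA : List Char → Int → Int → Option Int
  | [], _, _ => none
  | ch :: rest, i, nivel =>
    if ch = '{' then pvLoopA rest (i + 1) (nivel + 1)
    else if ch = '}' then pvLoopA rest (i + 1) (nivel - 1)
    else if ch = ',' ∧ nivel = 0 then some i
    else pvLoopA rest (i + 1) nivel

def encontrar_virgula_nivel_zero (texto : String) : Int :=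
  (pvLoopA texto.toList 0 0).getD 0

-- ===== PORT B =====
-- B: pass 1 builds the inclusive running brace-balance table.
def pvBalB : List Char → Int → List Int
  | [], _ => []
  | c :: rest, s =>
    let s' := if c = '{' then s + 1 else if c = '}' then s - 1 else s
    s' :: pvBalB rest s'

-- B: pass 2 searches for the first ',' whose table entry is 0.
def pvSearchB : List Char → List Int → Int → Option Int
  | c :: cs, b :: bs, i => if c = ',' ∧ b = 0 then some i else pvSearchB cs bs (i + 1)
  | _, _, _ => none

def encontrar_virgula_nivel_zero_alt (texto : String) : Int :=
  (pvSearchB texto.toList (pvBalB texto.toList 0) 0).getD 0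

-- ===== PRECONDITION & SPEC =====
-- Pre_ excludes exactly the inputs (no comma at brace level zero) on which the Python A
-- raises ValueError (B raises the same ValueError there).
def Pre_encontrar_virgula_nivel_zero (texto : String) : Prop :=
  ∃ i : Nat, i < texto.toList.length ∧ texto.toList[i]? = some ',' ∧
    ((texto.toList.take i).count '{' : Int) = ((texto.toList.take i).count '}' : Int)
instance (texto : String) : Decidable (Pre_encontrar_virgula_nivel_zero texto) := by
  unfold Pre_encontrar_virgula_nivel_zero; infer_instance

def pvWitness_encontrar_virgula_nivel_zero : String := "{x},y"

def Spec_encontrar_virgula_nivel_zero (texto : String) (out : Int) : Prop := out = encontrar_virgula_nivel_zero_alt texto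
instance (texto : String) (out : Int) : Decidable (Spec_encontrar_virgula_nivel_zero texto out) := by unfold Spec_encontrar_virgula_nivel_zero; infer_instance

-- ===== CLAIM (what is proved, stated in full; the proofs are below) =====
def Claim_equal_encontrar_virgula_nivel_zero : Prop := ∀ (texto : String), Dom_encontrar_virgula_nivel_zero texto → Pre_encontrar_virgula_nivel_zero texto → Spec_encontrar_virgula_nivel_zero texto (encontrar_virgula_nivel_zero texto)

-- ===== LEMMAS AND PROOFS =====
-- Core invariant: A's scan with current level s equals B's search against the balance
-- table started at s (a comma leaves the inclusive balance at s, braces shift it).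
theorem pvLoop_eq_search (l : List Char) : ∀ (i s : Int),
    pvLoopA l i s = pvSearchB l (pvBalB l s) i := by
  induction l with
  | nil => intro i s; rfl
  | cons c rest ih =>
    intro i s
    by_cases hb : c = '{'
    · simp [pvLoopA, pvSearchB, pvBalB, hb, ih]
    · by_cases hc : c = '}'
      · simp [pvLoopA, pvSearchB, pvBalB, hc, ih]
      · by_cases hv : c = ','
        · by_cases hs : s = 0
          · simp [pvLoopA, pvSearchB, pvBalB, hv, hs]
          · simp [pvLoopA, pvSearchB, pvBalB, hv, hs, ih]
        · simp [pvLoopA, pvSearchB, pvBalB, hb, hc, hv, ih]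

-- ===== VERDICT (by name: the statement is the Claim_ definition above) =====
theorem encontrar_virgula_nivel_zero_spec : Claim_equal_encontrar_virgula_nivel_zero := by
  intro texto _ _
  unfold Spec_encontrar_virgula_nivel_zero encontrar_virgula_nivel_zero encontrar_virgula_nivel_zero_alt
  rw [pvLoop_eq_search]
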